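-- pv_equiv track=rewrite | github.com/daniel-reich/ubiquitous-fiesta | kAQT4vMX2iEAcs8uJ_4.py | longest_7segment_word
-- ===== SOURCE A (Python) =====
-- def longest_7segment_word(lst):
--   ans=[]
--   bad=['k','m','v','w','x']
--   for i in lst:
--     if not any(item in i for item in bad):
--       ans.append(i)
--   if ans: return max(ans,key=len)
--   return ''
-- ===== SOURCE B (Python) =====
-- def longest_7segment_word(lst):
--   best = ''
--   for w in lst:
--     if all(c not in w for c in 'kmvwx') and len(w) > len(best):
--       best = w
--   return best
-- ===== Notes on version B (the rewrite author's own statement) =====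
-- stated objective: simpler
-- what changed: Replaces A's collect-all-valid-words-then-max(key=len) two-phase approach with a single pass keeping one running best (strict > preserves max's first-maximum tie-breaking); no intermediate list is built.
import Mathlib
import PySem

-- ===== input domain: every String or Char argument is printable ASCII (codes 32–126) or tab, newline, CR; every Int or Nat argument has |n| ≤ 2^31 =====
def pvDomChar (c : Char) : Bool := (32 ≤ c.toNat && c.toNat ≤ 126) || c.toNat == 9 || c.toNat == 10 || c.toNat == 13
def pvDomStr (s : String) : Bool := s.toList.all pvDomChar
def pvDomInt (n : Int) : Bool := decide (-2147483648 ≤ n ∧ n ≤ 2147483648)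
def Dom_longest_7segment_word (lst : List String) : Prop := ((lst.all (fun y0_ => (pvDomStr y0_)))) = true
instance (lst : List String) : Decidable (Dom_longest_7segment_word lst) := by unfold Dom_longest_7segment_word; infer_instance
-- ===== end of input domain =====

-- B replaces A's collect-then-max(key=len) two-phase scheme with a single pass keeping one
-- running best word (strict > preserves max's first-maximum tie-breaking). Objective: simpler.


-- ===== PORT A =====
def longest_7segment_word (lst : List String) : String :=
  let bad : List String := ["k", "m", "v", "w", "x"]
  let ans : List String :=
    lst.foldl (fun ans i =>
      if !(bad.any (fun item => PySem.Str.isIn item i)) then ans ++ [i] else ans) []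
  match PySem.List.max? ans (fun s => PySem.Str.len s) with
  | some m => m          -- 'if ans: return max(ans, key=len)'  (max? = none exactly when ans = [])
  | none => ""

-- ===== PORT B =====
def longest_7segment_word_alt (lst : List String) : String :=
  lst.foldl (fun best w =>
    if ("kmvwx".toList.all (fun c => !PySem.Str.isIn (String.ofList [c]) w))
        && decide (PySem.Str.len best < PySem.Str.len w)
    then w else best) ""

-- ===== PRECONDITION & SPEC =====
def Spec_longest_7segment_word (lst : List String) (out : String) : Prop := out = longest_7segment_word_alt lst
instance (lst : List String) (out : String) : Decidable (Spec_longest_7segment_word lst out) := by unfold Spec_longest_7segment_word; infer_instance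

-- ===== CLAIM (what is proved, stated in full; the proofs are below) =====
def Claim_equal_longest_7segment_word : Prop := ∀ (lst : List String), Dom_longest_7segment_word lst → Spec_longest_7segment_word lst (longest_7segment_word lst)

-- ===== LEMMAS AND PROOFS =====

-- A's validity test and B's validity test are the same Boolean.
theorem pv_valid_eq (i : String) :
    (!((["k", "m", "v", "w", "x"] : List String).any (fun item => PySem.Str.isIn item i)))
      = ("kmvwx".toList.all (fun c => !PySem.Str.isIn (String.ofList [c]) i)) := by
  have h : "kmvwx".toList = ['k', 'm', 'v', 'w', 'x'] := rfl
  rw [h]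
  simp [List.any, List.all]

theorem pv_str_len_zero {s : String} (h : PySem.Str.len s ≤ 0) : s = "" := by
  have hl : s.toList = [] := by
    have h2 : ((s.toList.length : Int)) ≤ 0 := by simpa [PySem.Str.len] using h
    have : s.toList.length = 0 := by omega
    exact List.eq_nil_of_length_eq_zero this
  cases s
  simp_all

-- max? over a snoc is one more step of its fold.
theorem pv_max?_append_singleton {α κ : Type} [LT κ] [DecidableLT κ]
    (xs : List α) (x : α) (key : α → κ) :
    PySem.List.max? (xs ++ [x]) key
      = match PySem.List.max? xs key with
        | none => some x
        | some m => if key m < key x then some x else some m := by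
  simp only [PySem.List.max?, List.foldl_append, List.foldl]
  rfl

-- One B-step applied to the first-maximum of ans equals the first-maximum after an A-step.
theorem pv_step (ans : List String) (i : String) :
    (match PySem.List.max? (ans ++ [i]) (fun s => PySem.Str.len s) with
      | some m => m | none => "")
    = (if decide (PySem.Str.len (match PySem.List.max? ans (fun s => PySem.Str.len s) with
          | some m => m | none => "") < PySem.Str.len i)
       then i
       else (match PySem.List.max? ans (fun s => PySem.Str.len s) with
          | some m => m | none => "")) := by
  rw [pv_max?_append_singleton]
  cases hm : PySem.List.max? ans (fun s => PySem.Str.len s) with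
  | none =>
    by_cases h : PySem.Str.len "" < PySem.Str.len i
    · simp
    · have hi : i = "" := pv_str_len_zero (by
        have := h
        simp [PySem.Str.len] at this ⊢
        omega)
      simp [hi]
  | some m =>
    by_cases h : PySem.Str.len m < PySem.Str.len i
    · have hn : m.length < i.length := by simpa [PySem.Str.len] using h
      simp [hn]
    · have hn : ¬ m.length < i.length := by simpa [PySem.Str.len] using h
      simp [hn]

-- Main invariant: finishing A's accumulator with max? equals B's running best started there.
theorem pv_invariant (lst : List String) : ∀ (ans : List String),
    (match PySem.List.max? (lst.foldl (fun a i =>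
        if !((["k", "m", "v", "w", "x"] : List String).any (fun item => PySem.Str.isIn item i))
        then a ++ [i] else a) ans) (fun s => PySem.Str.len s) with
      | some m => m | none => "")
    = lst.foldl (fun best w =>
        if ("kmvwx".toList.all (fun c => !PySem.Str.isIn (String.ofList [c]) w))
            && decide (PySem.Str.len best < PySem.Str.len w)
        then w else best)
        (match PySem.List.max? ans (fun s => PySem.Str.len s) with
          | some m => m | none => "") := by
  induction lst with
  | nil => intro ans; rfl
  | cons i rest ih =>
    intro ans
    simp only [List.foldl]
    rw [← pv_valid_eq i]
    by_cases hv : (!((["k", "m", "v", "w", "x"] : List String).any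
        (fun item => PySem.Str.isIn item i))) = true
    · rw [if_pos hv, hv, Bool.true_and, ih (ans ++ [i]), pv_step]
    · rw [if_neg hv, ih ans]
      have hf : (!((["k", "m", "v", "w", "x"] : List String).any
          (fun item => PySem.Str.isIn item i))) = false := by
        simpa using hv
      rw [hf, Bool.false_and, if_neg (by simp)]

-- ===== VERDICT (by name: the statement is the Claim_ definition above) =====
theorem longest_7segment_word_spec : Claim_equal_longest_7segment_word := by
  intro lst _
  unfold Spec_longest_7segment_word longest_7segment_word longest_7segment_word_alt
  simpa using pv_invariant lst []
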